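-- pv_equiv track=rewrite | github.com/pololee/oj-leetcode | other/916.word-subsets.py | bMax
-- ===== SOURCE A (Python) =====
-- from collections import Counter
--
-- def bMax(B):
--     bmax = dict()
--     for x in B:
--         xCnter = Counter(x)
--         for char, cnt in xCnter.items():
--             if char not in bmax or cnt > bmax[char]:
--                 bmax[char] = cnt
--
--     return bmax
-- ===== SOURCE B (Python) =====
-- def bMax(B):
--     # Character-major two-stage pass: first collect the distinct characters in
--     # first-appearance order, then for each such character take the maximum of
--     # its per-word counts; A is word-major with an in-place running-max dict.
--     s = "".join(B)
--     order = []
--     seen = set()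
--     for c in s:
--         if c not in seen:
--             seen.add(c)
--             order.append(c)
--     return {c: max(x.count(c) for x in B) for c in order}
-- ===== Notes on version B (the rewrite author's own statement) =====
-- stated objective: alternative
-- what changed: A is word-major: one pass over the words updating a running-max dict per character; B is character-major and staged: it first collects the distinct characters of ''.join(B) in first-appearance order, then for each such character computes max(x.count(c) for x in B) in a separate pass over the words.
import Mathlib
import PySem

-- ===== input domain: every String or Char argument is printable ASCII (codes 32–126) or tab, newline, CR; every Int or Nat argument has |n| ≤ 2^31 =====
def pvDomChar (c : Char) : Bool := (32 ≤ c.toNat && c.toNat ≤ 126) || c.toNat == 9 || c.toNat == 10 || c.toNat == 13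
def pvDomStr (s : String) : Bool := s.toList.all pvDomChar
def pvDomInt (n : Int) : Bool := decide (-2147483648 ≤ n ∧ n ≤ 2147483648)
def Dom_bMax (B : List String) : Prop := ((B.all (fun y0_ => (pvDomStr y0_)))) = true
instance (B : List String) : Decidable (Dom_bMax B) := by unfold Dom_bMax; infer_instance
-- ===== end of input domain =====

-- B replaces A's word-major running-max dict by a character-major two-stage pass:
-- distinct characters of the join in first-appearance order, then a max of per-word
-- counts for each (objective: alternative decomposition, same cost class).

-- ===== PORT A =====
def bMax (B : List String) : List (String × Int) :=
  (B.foldl (fun bmax x =>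
      (PySem.Dict.counter (x.toList.map String.singleton)).items.foldl
        (fun bmax p =>
          if !(bmax.contains p.1) || decide (bmax.getD p.1 0 < p.2) then
            bmax.insert p.1 p.2
          else bmax)
        bmax)
    PySem.Dict.empty).items

-- ===== PORT B =====
def bMax_alt (B : List String) : List (String × Int) :=
  let s := PySem.Str.join "" B
  -- the 'seen' set / 'order' list loop of Source B
  let st := s.toList.foldl
    (fun (p : PySem.Set Char × List Char) c =>
      if PySem.Set.contains p.1 c then p else (PySem.Set.add p.1 c, p.2 ++ [c]))
    (PySem.Set.empty, [])
  -- max(...) over a generator that is nonempty whenever it is evaluated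
  -- (c occurs in some word, so B ≠ []); ported totally with .getD 0
  st.2.map (fun c => (String.singleton c,
    (PySem.List.max? (B.map (fun x => (PySem.Str.count x (String.singleton c) : Int)))
      (fun y => y)).getD 0))

-- ===== PRECONDITION & SPEC =====
def Spec_bMax (B : List String) (out : List (String × Int)) : Prop := out = bMax_alt B
instance (B : List String) (out : List (String × Int)) : Decidable (Spec_bMax B out) := by unfold Spec_bMax; infer_instance

-- ===== CLAIM (what is proved, stated in full; the proofs are below) =====
def Claim_equal_bMax : Prop := ∀ (B : List String), Dom_bMax B → Spec_bMax B (bMax B)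

-- ===== LEMMAS AND PROOFS =====

-- first-match lookup in an association list (0 when absent)
def lkp (l : List (String × Int)) (k : String) : Int :=
  ((l.find? (fun q => q.1 == k)).map Prod.snd).getD 0

theorem lkp_of_not_mem (l : List (String × Int)) (k : String)
    (h : k ∉ l.map Prod.fst) : lkp l k = 0 := by
  rw [lkp, List.find?_eq_none.mpr]
  · rfl
  · intro q hq hqk
    exact h (List.mem_map.mpr ⟨q, hq, by simpa using hqk⟩)

theorem lkp_cons_self (q : String × Int) (t : List (String × Int)) :
    lkp (q :: t) q.1 = q.2 := by
  simp [lkp, List.find?_cons_of_pos]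

theorem lkp_cons_ne (q : String × Int) (t : List (String × Int)) (k : String)
    (h : k ≠ q.1) : lkp (q :: t) k = lkp t k := by
  rw [lkp, lkp, List.find?_cons_of_neg]
  simpa using fun h' => h h'.symm

theorem singleton_inj : Function.Injective String.singleton := by
  intro a b h
  have := congrArg String.toList h
  simpa using this

-- A's inner loop characterised: in-place per-key maximum, new keys appended
theorem stepA_items (l : List (String × Int)) (d : PySem.Dict String Int)
    (hnd : d.keys.Nodup) (hpos : ∀ p ∈ d.items, 0 < p.2)
    (hln : (l.map Prod.fst).Nodup) (hlp : ∀ p ∈ l, 0 < p.2) :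
    (l.foldl (fun bmax p =>
        if !(bmax.contains p.1) || decide (bmax.getD p.1 0 < p.2) then
          bmax.insert p.1 p.2
        else bmax) d).items
      = d.items.map (fun p => (p.1, if p.2 < lkp l p.1 then lkp l p.1 else p.2))
        ++ l.filter (fun p => !(d.contains p.1)) := by
  induction l generalizing d with
  | nil =>
    simp only [List.foldl_nil, List.filter_nil, List.append_nil]
    rw [List.map_congr_left (g := id) ?_, List.map_id]
    intro p hp
    have := hpos p hp
    have h0 : ¬ p.2 < lkp [] p.1 := by
      have : lkp [] p.1 = 0 := rfl
      omega
    simp [h0]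
  | cons q t ih =>
    have hq1t : q.1 ∉ t.map Prod.fst := (List.nodup_cons.mp (by simpa using hln)).1
    have htn : (t.map Prod.fst).Nodup := (List.nodup_cons.mp (by simpa using hln)).2
    have htp : ∀ p ∈ t, 0 < p.2 := fun p hp => hlp p (List.mem_cons_of_mem q hp)
    have hq2 : 0 < q.2 := hlp q (List.mem_cons_self)
    have hlkpq : lkp t q.1 = 0 := lkp_of_not_mem t q.1 hq1t
    rw [List.foldl_cons]
    by_cases hc : d.contains q.1 = true
    · have hq1d : q.1 ∈ d.keys := (PySem.Dict.contains_iff_mem_keys d q.1).mp hc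
      have hval : ∀ p ∈ d.items, p.1 = q.1 → p.2 = d.getD q.1 0 := by
        intro p hp h1
        have := PySem.Dict.getD_of_mem_items d (k := p.1) (v := p.2)
          (by simpa using hp) hnd 0
        rw [h1] at this
        omega
      by_cases hlt : d.getD q.1 0 < q.2
      · -- overwrite in place with the larger count
        rw [if_pos (by simp [hc, hlt])]
        rw [ih (d.insert q.1 q.2) (PySem.Dict.nodup_keys_insert d q.1 q.2 hnd) ?_ htn htp]
        · rw [PySem.Dict.items_insert_of_contains d q.2 hc, List.map_map]
          congr 1
          · apply List.map_congr_left
            intro p hp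
            by_cases hpq : p.1 = q.1
            · have hv := hval p hp hpq
              have hl1 : lkp (q :: t) p.1 = q.2 := by rw [hpq, lkp_cons_self]
              have hb : (p.1 == q.1) = true := by simpa using hpq
              have e1 : ¬ q.2 < lkp t q.1 := by rw [hlkpq]; omega
              have e4 : p.2 < q.2 := by omega
              simp only [Function.comp_apply, hb, if_true]
              simp [e1, lkp_cons_self, hpq, e4]
            · have : (p.1 == q.1) = false := by simpa using hpq
              simp only [Function.comp_apply, this, Bool.false_eq_true, if_false]
              rw [lkp_cons_ne q t p.1 hpq]
          · rw [List.filter_cons_of_neg (by simp [hc])]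
            apply List.filter_congr
            intro p hp
            have hpq : p.1 ≠ q.1 := fun h =>
              hq1t (h ▸ List.mem_map.mpr ⟨p, hp, rfl⟩)
            rw [PySem.Dict.contains_insert d q.1 p.1 q.2]
            simp [hpq]
        · -- positivity after the overwrite
          intro p hp
          rw [PySem.Dict.items_insert_of_contains d q.2 hc] at hp
          obtain ⟨p0, hp0, rfl⟩ := List.mem_map.mp hp
          by_cases h0 : (p0.1 == q.1) = true
          · simp only [h0, if_true]
            exact hq2
          · simp only [h0, Bool.false_eq_true, if_false]
            exact hpos p0 hp0
      · -- existing count at least as large: no write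
        rw [if_neg (by simp [hc, hlt])]
        rw [ih d hnd hpos htn htp]
        congr 1
        · apply List.map_congr_left
          intro p hp
          by_cases hpq : p.1 = q.1
          · have hv := hval p hp hpq
            have hl1 : lkp (q :: t) p.1 = q.2 := by rw [hpq, lkp_cons_self]
            have hp2 := hpos p hp
            rw [hpq] at *
            simp [hlkpq, hl1]
            omega
          · rw [lkp_cons_ne q t p.1 hpq]
        · rw [List.filter_cons_of_neg (by simp [hc])]
    · -- new key: appended at the end
      have hq1d : q.1 ∉ d.keys := fun h =>
        (by simpa using hc : ¬ d.contains q.1 = true)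
          ((PySem.Dict.contains_iff_mem_keys d q.1).mpr h)
      rw [if_pos (by simp [hc])]
      rw [ih (d.insert q.1 q.2) (PySem.Dict.nodup_keys_insert d q.1 q.2 hnd) ?_ htn htp]
      · rw [PySem.Dict.items_insert_of_not_contains d q.2 (by simpa using hc),
          List.map_append]
        have hmapq : [(q.1, q.2)].map
            (fun p => (p.1, if p.2 < lkp t p.1 then lkp t p.1 else p.2)) = [q] := by
          have : ¬ q.2 < lkp t q.1 := by rw [hlkpq]; omega
          simp [this]
        rw [hmapq, List.filter_cons_of_pos (by simp [hc])]
        have hfeq : t.filter (fun p => !(PySem.Dict.insert d q.1 q.2).contains p.1)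
            = t.filter (fun p => !(d.contains p.1)) := by
          apply List.filter_congr
          intro p hp
          have hpq : p.1 ≠ q.1 := fun h =>
            hq1t (h ▸ List.mem_map.mpr ⟨p, hp, rfl⟩)
          rw [PySem.Dict.contains_insert d q.1 p.1 q.2]
          simp [hpq]
        rw [hfeq]
        have hmeq : d.items.map
            (fun p => (p.1, if p.2 < lkp t p.1 then lkp t p.1 else p.2))
            = d.items.map
              (fun p => (p.1, if p.2 < lkp (q :: t) p.1 then lkp (q :: t) p.1 else p.2)) := by
          apply List.map_congr_left
          intro p hp
          have hpq : p.1 ≠ q.1 := fun h =>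
            hq1d (h ▸ PySem.Dict.mem_keys_of_mem_items d hp)
          rw [lkp_cons_ne q t p.1 hpq]
        rw [hmeq]
        simp
      · intro p hp
        rw [PySem.Dict.items_insert_of_not_contains d q.2 (by simpa using hc)] at hp
        rcases List.mem_append.mp hp with h | h
        · exact hpos p h
        · simp only [List.mem_singleton] at h
          rw [h]
          exact hq2

-- the running maximum of per-word counts of character c
def maxC (B : List String) (c : Char) : Nat :=
  B.foldl (fun m x => max m (x.toList.count c)) 0

theorem count_go_singleton (c : Char) (cs : List Char) (fuel acc : Nat)
    (h : cs.length ≤ fuel) :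
    PySem.Chars.count.go [c] fuel cs acc = acc + cs.count c := by
  induction cs generalizing fuel acc with
  | nil => cases fuel <;> simp [PySem.Chars.count.go]
  | cons a t ih =>
    cases fuel with
    | zero => simp at h
    | succ f =>
      have ht : t.length ≤ f := by simpa using h
      by_cases hac : c = a
      · subst hac
        simp [PySem.Chars.count.go, List.isPrefixOf, ih f (acc + 1) ht,
          List.count_cons]
        omega
      · have : (c == a) = false := by simpa using hac
        have hca : ¬ a = c := fun h => hac h.symm
        simp [PySem.Chars.count.go, List.isPrefixOf, this, ih f acc ht,
          List.count_cons, hca]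

theorem count_singleton (cs : List Char) (c : Char) :
    PySem.Chars.count cs [c] = cs.count c := by
  rw [PySem.Chars.count]
  simp [count_go_singleton c cs cs.length 0 le_rfl]

-- str.count with a single-character needle is the character count
theorem str_count_singleton (x : String) (c : Char) :
    PySem.Str.count x (String.singleton c) = x.toList.count c := by
  rw [PySem.Str.count_eq, String.toList_singleton, count_singleton]

theorem ofList_map_inj {f : Char → String} (hf : Function.Injective f)
    (l : List Char) : PySem.Set.ofList (l.map f) = (PySem.Set.ofList l).map f := by
  induction l using List.reverseRecOn with
  | nil => simp [PySem.Set.ofList_nil]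
  | append_singleton t x ih =>
    rw [List.map_append, List.map_singleton, PySem.Set.ofList_append_singleton,
      PySem.Set.ofList_append_singleton, ih, PySem.Set.add, PySem.Set.add]
    by_cases hx : x ∈ PySem.Set.ofList t
    · rw [if_pos, if_pos] <;> simp_all
    · rw [if_neg, if_neg]
      · simp
      · simpa using hx
      · simp only [PySem.Set.contains, List.contains_eq_mem, decide_eq_true_eq]
        intro hm
        obtain ⟨y, hy, hyx⟩ := List.mem_map.mp hm
        exact hx (hf hyx ▸ hy)

-- PySem.List.dedup of an append: old distinct chars, then the new ones in order
theorem dedup_append (a b : List Char) :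
    PySem.List.dedup (a ++ b)
      = PySem.List.dedup a ++ (PySem.List.dedup b).filter (fun c => !(a.contains c)) := by
  simp only [PySem.List.dedup_eq_ofList]
  induction b using List.reverseRecOn with
  | nil => simp [PySem.Set.ofList_nil]
  | append_singleton t x ih =>
    rw [← List.append_assoc, PySem.Set.ofList_append_singleton,
      PySem.Set.ofList_append_singleton, ih]
    by_cases h2 : x ∈ PySem.Set.ofList t
    · have e2 : (PySem.Set.ofList t).add x = PySem.Set.ofList t := by
        rw [PySem.Set.add, if_pos]
        simpa [PySem.Set.contains, List.contains_eq_mem] using h2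
      have e1 : PySem.Set.add (PySem.Set.ofList a ++
          (PySem.Set.ofList t).filter (fun c => !(a.contains c))) x
          = PySem.Set.ofList a ++
            (PySem.Set.ofList t).filter (fun c => !(a.contains c)) := by
        rw [PySem.Set.add]
        by_cases h1 : x ∈ a
        · rw [if_pos]
          simp only [PySem.Set.contains, List.contains_eq_mem, decide_eq_true_eq,
            List.mem_append]
          exact Or.inl ((PySem.Set.mem_ofList a x).mpr h1)
        · rw [if_pos]
          simp only [PySem.Set.contains, List.contains_eq_mem, decide_eq_true_eq,
            List.mem_append, List.mem_filter]
          exact Or.inr ⟨h2, by simp [List.contains_eq_mem, h1]⟩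
      rw [e1, e2]
    · have e2 : (PySem.Set.ofList t).add x = PySem.Set.ofList t ++ [x] := by
        rw [PySem.Set.add, if_neg]
        simpa [PySem.Set.contains, List.contains_eq_mem] using h2
      rw [e2, List.filter_append]
      by_cases h1 : x ∈ a
      · have e3 : ([x].filter (fun c => !(a.contains c))) = [] := by
          simp [List.contains_eq_mem, h1]
        have e1 : PySem.Set.add (PySem.Set.ofList a ++
            (PySem.Set.ofList t).filter (fun c => !(a.contains c))) x
            = PySem.Set.ofList a ++
              (PySem.Set.ofList t).filter (fun c => !(a.contains c)) := by
          rw [PySem.Set.add, if_pos]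
          simp only [PySem.Set.contains, List.contains_eq_mem, decide_eq_true_eq,
            List.mem_append]
          exact Or.inl ((PySem.Set.mem_ofList a x).mpr h1)
        rw [e1, e3]
        simp
      · have e3 : ([x].filter (fun c => !(a.contains c))) = [x] := by
          simp [List.contains_eq_mem, h1]
        have e1 : PySem.Set.add (PySem.Set.ofList a ++
            (PySem.Set.ofList t).filter (fun c => !(a.contains c))) x
            = (PySem.Set.ofList a ++
              (PySem.Set.ofList t).filter (fun c => !(a.contains c))) ++ [x] := by
          rw [PySem.Set.add, if_neg]
          simp only [PySem.Set.contains, List.contains_eq_mem, decide_eq_true_eq,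
            List.mem_append, List.mem_filter]
          rintro (h | h)
          · exact h1 ((PySem.Set.mem_ofList a x).mp h)
          · exact h2 h.1
        rw [e1, e3, List.append_assoc]

theorem maxC_append (ws : List String) (x : String) (c : Char) :
    maxC (ws ++ [x]) c = max (maxC ws c) (x.toList.count c) := by
  simp [maxC, List.foldl_append]

theorem foldl_max_const (l : List String) (c : Char) (m : Nat)
    (h : ∀ x ∈ l, x.toList.count c = 0) :
    l.foldl (fun m x => max m (x.toList.count c)) m = m := by
  induction l generalizing m with
  | nil => rfl
  | cons y t ih =>
    rw [List.foldl_cons, h y List.mem_cons_self, Nat.max_zero]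
    exact ih _ (fun x hx => h x (List.mem_cons_of_mem y hx))

theorem maxC_of_not_mem (ws : List String) (c : Char)
    (h : c ∉ (ws.map String.toList).flatten) : maxC ws c = 0 := by
  apply foldl_max_const
  intro x hx
  refine List.count_eq_zero.mpr (fun hc => h ?_)
  exact List.mem_flatten.mpr ⟨x.toList, List.mem_map_of_mem hx, hc⟩

theorem init_le_foldl_max (l : List String) (c : Char) (m : Nat) :
    m ≤ l.foldl (fun m x => max m (x.toList.count c)) m := by
  induction l generalizing m with
  | nil => exact le_rfl
  | cons y t ih =>
    rw [List.foldl_cons]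
    exact le_trans (le_max_left _ _) (ih _)

theorem count_le_maxC (ws : List String) (c : Char) (x : String) (hx : x ∈ ws) :
    x.toList.count c ≤ maxC ws c := by
  have gen : ∀ (l : List String) (m : Nat), x ∈ l →
      x.toList.count c ≤ l.foldl (fun m y => max m (y.toList.count c)) m := by
    intro l
    induction l with
    | nil => intro m hx; cases hx
    | cons y t ih =>
      intro m hx
      rw [List.foldl_cons]
      rcases List.mem_cons.mp hx with rfl | hx
      · exact le_trans (le_max_right m _) (init_le_foldl_max t c _)
      · exact ih _ hx
  exact gen ws 0 hx

theorem maxC_pos (ws : List String) (c : Char)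
    (h : c ∈ (ws.map String.toList).flatten) : 0 < maxC ws c := by
  obtain ⟨l, hl, hc⟩ := List.mem_flatten.mp h
  obtain ⟨x, hx, rfl⟩ := List.mem_map.mp hl
  exact lt_of_lt_of_le (List.count_pos_iff.mpr hc) (count_le_maxC ws c x hx)

-- lookup of a singleton key in the char-indexed association list
theorem lkp_map_sing (l : List Char) (g : Char → Int) (c : Char) :
    lkp (l.map (fun d => (String.singleton d, g d))) (String.singleton c)
      = if c ∈ l then g c else 0 := by
  induction l with
  | nil => simp [lkp]
  | cons d t ih =>
    by_cases hdc : d = c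
    · subst hdc
      simpa using lkp_cons_self (String.singleton d, g d) _
    · rw [List.map_cons, lkp_cons_ne _ _ _ (fun h => hdc (singleton_inj h).symm), ih]
      simp [Ne.symm hdc]

-- the characterisation of A's whole fold
theorem thmA (ws : List String) :
    bMax ws = (PySem.List.dedup ((ws.map String.toList).flatten)).map
      (fun c => (String.singleton c, (maxC ws c : Int))) := by
  induction ws using List.reverseRecOn with
  | nil => rfl
  | append_singleton ws x ih =>
    have hflat : ((ws ++ [x]).map String.toList).flatten
        = (ws.map String.toList).flatten ++ x.toList := by
      simp
    simp only [bMax] at ih ⊢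
    rw [List.foldl_append, List.foldl_cons, List.foldl_nil]
    set d := ws.foldl (fun bmax x =>
        (PySem.Dict.counter (x.toList.map String.singleton)).items.foldl
          (fun bmax p =>
            if !(bmax.contains p.1) || decide (bmax.getD p.1 0 < p.2) then
              bmax.insert p.1 p.2
            else bmax) bmax) PySem.Dict.empty with hddef
    have hd : d.items = (PySem.List.dedup ((ws.map String.toList).flatten)).map
        (fun c => (String.singleton c, (maxC ws c : Int))) := ih
    have hkeys : d.keys = (PySem.List.dedup ((ws.map String.toList).flatten)).map
        String.singleton := by
      show d.items.map Prod.fst = _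
      rw [hd, List.map_map]
      rfl
    have hnd : d.keys.Nodup := by
      rw [hkeys]
      exact (PySem.List.nodup_dedup _).map singleton_inj
    have hpos : ∀ p ∈ d.items, 0 < p.2 := by
      intro p hp
      rw [hd] at hp
      obtain ⟨c, hc, rfl⟩ := List.mem_map.mp hp
      have : c ∈ (ws.map String.toList).flatten :=
        (PySem.List.mem_dedup _ _).mp hc
      have := maxC_pos ws c this
      simpa using this
    have hl : (PySem.Dict.counter (x.toList.map String.singleton)).items
        = (PySem.List.dedup x.toList).map
            (fun c => (String.singleton c, (x.toList.count c : Int))) := by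
      rw [PySem.Dict.items_counter, ofList_map_inj singleton_inj, List.map_map,
        PySem.List.dedup_eq_ofList]
      apply List.map_congr_left
      intro c _
      simp [List.count_map_of_injective _ _ singleton_inj]
    have hln : ((PySem.Dict.counter (x.toList.map String.singleton)).items.map
        Prod.fst).Nodup := by
      rw [hl, List.map_map]
      exact (PySem.List.nodup_dedup _).map singleton_inj
    have hlp : ∀ p ∈ (PySem.Dict.counter (x.toList.map String.singleton)).items,
        0 < p.2 := by
      intro p hp
      rw [hl] at hp
      obtain ⟨c, hc, rfl⟩ := List.mem_map.mp hp
      have : c ∈ x.toList := (PySem.List.mem_dedup _ _).mp hc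
      have := List.count_pos_iff.mpr this
      simpa using this
    rw [stepA_items _ d hnd hpos hln hlp, hd, hl, hflat, dedup_append,
      List.map_append, List.map_map, List.filter_map]
    congr 1
    · -- existing keys: in-place maximum
      apply List.map_congr_left
      intro c hc
      have hlkp : lkp ((PySem.List.dedup x.toList).map
          (fun c => (String.singleton c, (x.toList.count c : Int))))
          (String.singleton c) = (x.toList.count c : Int) := by
        rw [lkp_map_sing]
        by_cases hm : c ∈ PySem.List.dedup x.toList
        · rw [if_pos hm]
        · rw [if_neg hm]
          have : c ∉ x.toList := fun h => hm ((PySem.List.mem_dedup _ _).mpr h)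
          simp [List.count_eq_zero.mpr this]
      simp only [Function.comp_apply, hlkp, maxC_append, Nat.cast_max]
      congr 1
      by_cases h : ((maxC ws c : Nat) : Int) < ((x.toList.count c : Nat) : Int)
      · rw [if_pos h, max_eq_right (le_of_lt h)]
      · rw [if_neg h, max_eq_left (not_lt.mp h)]
    · -- new keys: appended with their own count
      have hpred : ∀ c ∈ PySem.List.dedup x.toList,
          (!(d.contains (String.singleton c)))
          = (!((ws.map String.toList).flatten.contains c)) := by
        intro c _
        congr 1
        by_cases hm : c ∈ (ws.map String.toList).flatten
        · have h1 : d.contains (String.singleton c) = true := by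
            refine (PySem.Dict.contains_iff_mem_keys d _).mpr ?_
            rw [hkeys]
            exact List.mem_map_of_mem ((PySem.List.mem_dedup _ _).mpr hm)
          rw [h1]
          simpa [List.contains_eq_mem] using hm
        · have h1 : ¬ d.contains (String.singleton c) = true := by
            intro h
            have := (PySem.Dict.contains_iff_mem_keys d _).mp h
            rw [hkeys] at this
            obtain ⟨c2, hc2, he⟩ := List.mem_map.mp this
            exact hm ((PySem.List.mem_dedup _ _).mp (singleton_inj he ▸ hc2))
          rw [Bool.not_eq_true] at h1
          rw [h1]
          simpa [List.contains_eq_mem] using hm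
      have hcomp : ((fun p : String × Int => !(d.contains p.1)) ∘
          (fun c => (String.singleton c, (x.toList.count c : Int))))
          = fun c => !(d.contains (String.singleton c)) := rfl
      rw [hcomp, List.filter_congr hpred]
      apply List.map_congr_left
      intro c hc
      have hcm := List.mem_filter.mp hc
      have hnm : c ∉ (ws.map String.toList).flatten := by
        simpa [List.contains_eq_mem] using hcm.2
      rw [maxC_append, maxC_of_not_mem ws c hnm, Nat.zero_max]

-- ''.join with an empty separator is list flatten
theorem join_empty_sep (ls : List (List Char)) :
    PySem.Chars.join [] ls = ls.flatten := by
  induction ls with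
  | nil => simp [PySem.Chars.join_nil]
  | cons p rest ih =>
    cases rest with
    | nil => simp [PySem.Chars.join_singleton]
    | cons q r => rw [PySem.Chars.join_cons_cons, ih]; simp

-- the seen/order pair loop keeps both components equal to the running set
theorem fold_pair (cs : List Char) (l : PySem.Set Char) :
    cs.foldl (fun (p : PySem.Set Char × List Char) c =>
        if PySem.Set.contains p.1 c then p else (PySem.Set.add p.1 c, p.2 ++ [c]))
      (l, l)
      = (cs.foldl PySem.Set.add l, cs.foldl PySem.Set.add l) := by
  induction cs generalizing l with
  | nil => rfl
  | cons c t ih =>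
    rw [List.foldl_cons, List.foldl_cons]
    by_cases h : PySem.Set.contains l c = true
    · rw [if_pos h]
      have : PySem.Set.add l c = l := by rw [PySem.Set.add, if_pos h]
      rw [this, ih]
    · rw [if_neg h]
      have : PySem.Set.add l c = l ++ [c] := by rw [PySem.Set.add, if_neg h]
      rw [this, ih]

theorem cast_foldl_max (t : List String) (g : String → Nat) (a : Nat) :
    (t.map (fun x => ((g x : Nat) : Int))).foldl max ((a : Nat) : Int)
      = ((t.foldl (fun m x => max m (g x)) a : Nat) : Int) := by
  induction t generalizing a with
  | nil => rfl
  | cons y r ih =>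
    rw [List.map_cons, List.foldl_cons, List.foldl_cons, ← Nat.cast_max, ih]

-- the characterisation of B
theorem thmB (B : List String) :
    bMax_alt B = (PySem.List.dedup ((B.map String.toList).flatten)).map
      (fun c => (String.singleton c, (maxC B c : Int))) := by
  have hs : (PySem.Str.join "" B).toList = (B.map String.toList).flatten := by
    rw [PySem.Str.toList_join]
    have : ("" : String).toList = [] := rfl
    rw [this, join_empty_sep]
  simp only [bMax_alt]
  rw [hs]
  have hpair : ((B.map String.toList).flatten.foldl
      (fun (p : PySem.Set Char × List Char) c =>
        if PySem.Set.contains p.1 c then p else (PySem.Set.add p.1 c, p.2 ++ [c]))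
      (PySem.Set.empty, [])).2
      = PySem.List.dedup ((B.map String.toList).flatten) := by
    have he : (PySem.Set.empty, ([] : List Char))
        = (([] : PySem.Set Char), ([] : List Char)) := rfl
    rw [he, fold_pair, PySem.List.dedup_eq_ofList, PySem.Set.ofList_eq_foldl]
  rw [hpair]
  apply List.map_congr_left
  intro c hc
  have hcm : c ∈ (B.map String.toList).flatten :=
    (PySem.List.mem_dedup _ _).mp hc
  congr 1
  have hfx : (fun x => (PySem.Str.count x (String.singleton c) : Int))
      = fun x => ((x.toList.count c : Nat) : Int) := by
    funext x
    rw [str_count_singleton]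
  rw [hfx]
  cases B with
  | nil => simp at hcm
  | cons y t =>
    rw [List.map_cons, PySem.List.max?_id_cons, Option.getD_some,
      cast_foldl_max t (fun x => x.toList.count c) (y.toList.count c)]
    have : maxC (y :: t) c
        = t.foldl (fun m x => max m (x.toList.count c)) (y.toList.count c) := by
      rw [maxC, List.foldl_cons, Nat.zero_max]
    rw [this]

-- ===== VERDICT (by name: the statement is the Claim_ definition above) =====
theorem bMax_spec : Claim_equal_bMax := by
  intro B _
  unfold Spec_bMax
  rw [thmA, thmB]
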